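-- pv_equiv track=rewrite | github.com/cp5337/sx9 | .qodo/04-abe-iac/add_to_chromadb_with_unicode.py | hash_to_unicode
-- ===== SOURCE A (Python) =====
-- UNICODE_SYSTEM_CONTROLLER_START = 0xE000  # U+E000-E0FF: System Controller
--
-- UNICODE_TRIVARIATE_PROCESSOR_START = 0xE100  # U+E100-E1FF: Trivariate Processor (SCH)
--
-- UNICODE_CONTEXT_PROCESSOR_START = 0xE200  # U+E200-E2FF: Context Processor (CUID)
--
-- UNICODE_INTELLIGENCE_PROCESSOR_START = 0xE300  # U+E300-E3FF: Intelligence Processor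
--
-- UNICODE_KALI_TOOLS_START = 0xE800  # U+E800-E8FF: Kali Tools
--
-- BASE96_CHARSET = "0123456789ABCDEFGHIJKLMNOPQRSTUVWXYZabcdefghijklmnopqrstuvwxyz!#$%&()*+,-./:;<=>?@[]^_{|}~`\"'\\"
--
-- def hash_to_unicode(hash_component: str, component_type: str) -> int:
--     """
--     Map hash component to Unicode operation (RFC-9002).
--
--     Args:
--         hash_component: Base96 hash string (16 chars for SCH/CUID/UUID)
--         component_type: "SCH", "CUID", "UUID", "TOOL", etc.
--
--     Returns:
--         Unicode code point (U+E000-E9FF)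
--     """
--     if not hash_component:
--         return UNICODE_SYSTEM_CONTROLLER_START
--
--     # Convert Base96 hash to integer
--     hash_int = 0
--     for i, c in enumerate(hash_component[:8]):  # Use first 8 chars
--         if c in BASE96_CHARSET:
--             hash_int += BASE96_CHARSET.index(c) * (96 ** i)
--
--     # Map to Unicode range based on component type
--     if component_type == "SCH":
--         # U+E100-E1FF: Trivariate Processor (SCH positions 1-16)
--         return UNICODE_TRIVARIATE_PROCESSOR_START + (hash_int % 256)
--     elif component_type == "CUID":
--         # U+E200-E2FF: Context Processor (CUID positions 17-32)
--         return UNICODE_CONTEXT_PROCESSOR_START + (hash_int % 256)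
--     elif component_type == "UUID":
--         # U+E000-E0FF: System Controller (UUID positions 33-48)
--         return UNICODE_SYSTEM_CONTROLLER_START + (hash_int % 256)
--     elif component_type == "TOOL":
--         # U+E800-E8FF: Kali Tools
--         return UNICODE_KALI_TOOLS_START + (hash_int % 256)
--     else:
--         # Default: Intelligence Processor (U+E300-E3FF)
--         return UNICODE_INTELLIGENCE_PROCESSOR_START + (hash_int % 256)
-- ===== SOURCE B (Python) =====
-- BASE96_CHARSET = "0123456789ABCDEFGHIJKLMNOPQRSTUVWXYZabcdefghijklmnopqrstuvwxyz!#$%&()*+,-./:;<=>?@[]^_{|}~`\"'\\"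
--
-- _TYPE_OFFSETS = {"SCH": 0xE100, "CUID": 0xE200, "UUID": 0xE000, "TOOL": 0xE800}
--
-- def _digit(c):
--     return BASE96_CHARSET.index(c) if c in BASE96_CHARSET else 0
--
-- def hash_to_unicode(hash_component: str, component_type: str) -> int:
--     # 96**2 = 9216 = 36*256, so every base-96 digit at position >= 2 is 0 mod 256:
--     # the whole 8-char accumulation mod 256 is determined by the first two chars alone.
--     if not hash_component:
--         return 0xE000
--     v = _digit(hash_component[0])
--     if len(hash_component) > 1:
--         v += 96 * _digit(hash_component[1])
--     return _TYPE_OFFSETS.get(component_type, 0xE300) + v % 256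
-- ===== Notes on version B (the rewrite author's own statement) =====
-- stated objective: simpler
-- what changed: Replaces the 8-character base-96 accumulation loop with a closed form on the first two characters only (valid because 96^2 = 36*256, so every higher digit is 0 mod 256), and the if/elif type dispatch with a dict lookup with an Intelligence-Processor default.
import Mathlib
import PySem

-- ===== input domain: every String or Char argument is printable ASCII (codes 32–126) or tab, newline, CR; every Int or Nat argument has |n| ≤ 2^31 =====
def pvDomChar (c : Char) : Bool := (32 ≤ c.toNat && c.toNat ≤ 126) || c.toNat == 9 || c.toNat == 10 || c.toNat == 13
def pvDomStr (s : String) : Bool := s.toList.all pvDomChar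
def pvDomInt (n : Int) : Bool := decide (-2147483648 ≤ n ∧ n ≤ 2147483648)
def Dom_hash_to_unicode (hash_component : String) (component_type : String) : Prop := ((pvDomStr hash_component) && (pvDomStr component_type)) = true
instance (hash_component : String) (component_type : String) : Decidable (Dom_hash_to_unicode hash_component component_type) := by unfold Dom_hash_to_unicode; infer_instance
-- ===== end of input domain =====

-- B replaces A's 8-character base-96 accumulation loop by a closed form on the first two
-- characters, correct because 96^2 = 36*256 makes every higher digit vanish mod 256.

def BASE96_CHARSET : List Char :=
  "0123456789ABCDEFGHIJKLMNOPQRSTUVWXYZabcdefghijklmnopqrstuvwxyz!#$%&()*+,-./:;<=>?@[]^_{|}~`\"'\\".toList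

-- ===== PORT A =====
-- the enumerate loop: i is the running position, h the accumulated hash_int
def aLoop : List Char → Nat → Int → Int
  | [], _, h => h
  | c :: rest, i, h =>
      aLoop rest (i + 1)
        (if BASE96_CHARSET.contains c then h + (BASE96_CHARSET.idxOf c : Int) * 96 ^ i else h)

def hash_to_unicode (hash_component : String) (component_type : String) : Int :=
  if hash_component.toList = [] then 0xE000
  else
    let hash_int := aLoop (hash_component.toList.take 8) 0 0
    if component_type = "SCH" then 0xE100 + PySem.Int.mod hash_int 256
    else if component_type = "CUID" then 0xE200 + PySem.Int.mod hash_int 256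
    else if component_type = "UUID" then 0xE000 + PySem.Int.mod hash_int 256
    else if component_type = "TOOL" then 0xE800 + PySem.Int.mod hash_int 256
    else 0xE300 + PySem.Int.mod hash_int 256

-- ===== PORT B =====
def TYPE_OFFSETS : PySem.Dict String Int :=
  PySem.Dict.ofList [("SCH", 0xE100), ("CUID", 0xE200), ("UUID", 0xE000), ("TOOL", 0xE800)]

def bDigit (c : Char) : Int :=
  if BASE96_CHARSET.contains c then (BASE96_CHARSET.idxOf c : Int) else 0

def hash_to_unicode_alt (hash_component : String) (component_type : String) : Int :=
  match hash_component.toList with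
  | [] => 0xE000
  | c0 :: rest =>
      let v := bDigit c0 + (match rest with | [] => 0 | c1 :: _ => 96 * bDigit c1)
      TYPE_OFFSETS.getD component_type 0xE300 + PySem.Int.mod v 256

-- ===== PRECONDITION & SPEC =====
def Spec_hash_to_unicode (hash_component : String) (component_type : String) (out : Int) : Prop := out = hash_to_unicode_alt hash_component component_type
instance (hash_component : String) (component_type : String) (out : Int) : Decidable (Spec_hash_to_unicode hash_component component_type out) := by unfold Spec_hash_to_unicode; infer_instance

-- ===== CLAIM (what is proved, stated in full; the proofs are below) =====
def Claim_equal_hash_to_unicode : Prop := ∀ (hash_component : String) (component_type : String), Dom_hash_to_unicode hash_component component_type → Spec_hash_to_unicode hash_component component_type (hash_to_unicode hash_component component_type)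

-- ===== LEMMAS AND PROOFS =====
-- Every term added at position i ≥ 2 is a multiple of 256 (96^2 = 36*256), so the loop does
-- not change the accumulator mod 256 from position 2 on.
theorem aLoop_mod_high (xs : List Char) (i : Nat) (h : Int) (hi : 2 ≤ i) :
    (aLoop xs i h) % 256 = h % 256 := by
  induction xs generalizing i h with
  | nil => rfl
  | cons c t ih =>
      simp only [aLoop]
      rw [ih (i + 1) _ (by omega)]
      split
      · obtain ⟨j, rfl⟩ : ∃ j, i = j + 2 := ⟨i - 2, by omega⟩
        have he : h + (BASE96_CHARSET.idxOf c : Int) * 96 ^ (j + 2)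
            = h + 256 * ((BASE96_CHARSET.idxOf c : Int) * (36 * 96 ^ j)) := by ring
        rw [he, Int.add_mul_emod_self_left]
      · rfl

theorem aLoop_mod (xs : List Char) :
    (aLoop xs 0 0) % 256
      = (match xs with
         | [] => 0
         | c0 :: rest => bDigit c0 + (match rest with | [] => 0 | c1 :: _ => 96 * bDigit c1)) % 256 := by
  match xs with
  | [] => rfl
  | [c0] =>
      simp only [aLoop, bDigit]
      split <;> simp
  | c0 :: c1 :: t =>
      simp only [aLoop]
      rw [aLoop_mod_high t 2 _ (le_refl 2)]
      simp only [bDigit]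
      split <;> split <;> (try rfl) <;> ring_nf

set_option maxRecDepth 2048 in
theorem TYPE_OFFSETS_items :
    TYPE_OFFSETS.items = [("SCH", 57600), ("CUID", 57856), ("UUID", 57344), ("TOOL", 59392)] := by
  rfl

theorem TYPE_OFFSETS_getD (ct : String) :
    TYPE_OFFSETS.getD ct 58112
      = if ct = "SCH" then 57600 else if ct = "CUID" then 57856
        else if ct = "UUID" then 57344 else if ct = "TOOL" then 59392 else (58112 : Int) := by
  simp only [PySem.Dict.getD, PySem.Dict.get?, TYPE_OFFSETS_items, List.find?_cons, List.find?_nil]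
  by_cases h1 : ct = "SCH" <;> by_cases h2 : ct = "CUID" <;> by_cases h3 : ct = "UUID" <;>
    by_cases h4 : ct = "TOOL" <;>
    simp only [h1, h2, h3, h4, if_true, if_false] <;>
    first
      | rfl
      | (rw [show (("SCH" : String) == ct) = false from by
              rw [beq_eq_false_iff_ne]; exact fun h => h1 h.symm,
            show (("CUID" : String) == ct) = false from by
              rw [beq_eq_false_iff_ne]; exact fun h => h2 h.symm,
            show (("UUID" : String) == ct) = false from by
              rw [beq_eq_false_iff_ne]; exact fun h => h3 h.symm,
            show (("TOOL" : String) == ct) = false from by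
              rw [beq_eq_false_iff_ne]; exact fun h => h4 h.symm]
         rfl)

theorem hash_to_unicode_spec : Claim_equal_hash_to_unicode := by
  intro hc ct _
  unfold Spec_hash_to_unicode hash_to_unicode hash_to_unicode_alt
  cases h0 : hc.toList with
  | nil => simp
  | cons c0 rest =>
      simp only [reduceCtorEq, if_false]
      cases rest with
      | nil =>
          have hm : PySem.Int.mod (aLoop ([c0].take 8) 0 0) 256
              = PySem.Int.mod (bDigit c0 + 0) 256 := by
            rw [PySem.Int.mod_eq_emod_of_pos (by norm_num),
                PySem.Int.mod_eq_emod_of_pos (by norm_num)]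
            simpa using aLoop_mod [c0]
          rw [hm, TYPE_OFFSETS_getD]
          split_ifs <;> rfl
      | cons c1 t =>
          have hm : PySem.Int.mod (aLoop ((c0 :: c1 :: t).take 8) 0 0) 256
              = PySem.Int.mod (bDigit c0 + 96 * bDigit c1) 256 := by
            rw [PySem.Int.mod_eq_emod_of_pos (by norm_num),
                PySem.Int.mod_eq_emod_of_pos (by norm_num)]
            have := aLoop_mod (c0 :: c1 :: t.take 6)
            simpa [List.take] using this
          rw [hm, TYPE_OFFSETS_getD]
          split_ifs <;> rfl
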